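-- pv_equiv track=rewrite | github.com/Waxmard/git-ai | python/git_ai/_pr_prompt_build.py | _to_rs_delimited_log
-- ===== SOURCE A (Python) =====
-- def _to_rs_delimited_log(log: str) -> str:
--     if not log.strip():
--         return ""
--     blocks: list[str] = []
--     current: list[str] = []
--     for line in log.splitlines():
--         if line.startswith("GITAI_COMMIT "):
--             if current:
--                 blocks.append("\n".join(current))
--             current = [line[len("GITAI_COMMIT "):]]
--         else:
--             current.append(line)
--     if current:
--         blocks.append("\n".join(current))
--     return "\x1e".join(blocks) + "\x1e"
-- ===== SOURCE B (Python) =====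
-- def _to_rs_delimited_log(log: str) -> str:
--     if not log.strip():
--         return ""
--     P = "GITAI_COMMIT "
--
--     def split_at_commit(lines):
--         for i, line in enumerate(lines):
--             if line.startswith(P):
--                 return lines[:i], lines[i:]
--         return lines, []
--
--     head, rest = split_at_commit(log.splitlines())
--     blocks = ["\n".join(head)] if head else []
--     while rest:
--         body, tail = split_at_commit(rest[1:])
--         blocks.append("\n".join([rest[0][len(P):]] + body))
--         rest = tail
--     return "\x1e".join(blocks) + "\x1e"
-- ===== Notes on version B (the rewrite author's own statement) =====
-- stated objective: alternative
-- what changed: Replaces A's single-pass accumulator loop (blocks/current state) with a span-based decomposition: repeatedly split the line list at the next commit-marker line and emit each segment as a block.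
import Mathlib
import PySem

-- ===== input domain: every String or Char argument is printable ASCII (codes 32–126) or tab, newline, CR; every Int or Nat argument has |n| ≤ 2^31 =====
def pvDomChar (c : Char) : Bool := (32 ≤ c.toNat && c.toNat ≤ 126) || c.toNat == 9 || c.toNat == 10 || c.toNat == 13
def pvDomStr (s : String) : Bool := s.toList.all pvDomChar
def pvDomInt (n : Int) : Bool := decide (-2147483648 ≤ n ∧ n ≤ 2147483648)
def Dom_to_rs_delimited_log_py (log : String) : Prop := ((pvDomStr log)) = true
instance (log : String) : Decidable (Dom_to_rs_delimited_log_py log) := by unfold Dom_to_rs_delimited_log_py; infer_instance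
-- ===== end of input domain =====

-- B replaces A's single-pass accumulator loop by a span-based decomposition:
-- split the line list at commit markers and build each block from its segment (objective: alternative).


-- ===== PORT A =====
-- loop body of A's 'for line in log.splitlines()': state = (blocks, current)
def pvStepA (st : List String × List String) (line : String) : List String × List String :=
  if PySem.Str.startswith line "GITAI_COMMIT " then
    ((if st.2 = [] then st.1 else st.1 ++ [PySem.Str.join "\n" st.2]),
     [PySem.Str.slice line (some (PySem.Str.len "GITAI_COMMIT ")) none])
  else (st.1, st.2 ++ [line])

-- A's trailing 'if current: blocks.append("\n".join(current))'
def pvFinalizeA (st : List String × List String) : List String :=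
  if st.2 = [] then st.1 else st.1 ++ [PySem.Str.join "\n" st.2]

def to_rs_delimited_log_py (log : String) : String :=
  if PySem.Str.strip log = "" then ""
  else
    PySem.Str.join "\x1e"
      (pvFinalizeA ((PySem.Str.splitlines log).foldl pvStepA ([], []))) ++ "\x1e"

-- ===== PORT B =====
def pvNotCommit (line : String) : Bool := !(PySem.Str.startswith line "GITAI_COMMIT ")

-- B's split_at_commit: (lines up to the first commit line, the rest from it)
def pvSplitAtCommit (lines : List String) : List String × List String :=
  (lines.takeWhile pvNotCommit, lines.dropWhile pvNotCommit)

-- B's while loop: rest is empty or starts with a commit line; one block per iteration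
def pvBodyBlocks : List String → List String
  | [] => []
  | c :: rest =>
      PySem.Str.join "\n"
        (PySem.Str.slice c (some (PySem.Str.len "GITAI_COMMIT ")) none :: (pvSplitAtCommit rest).1)
        :: pvBodyBlocks (pvSplitAtCommit rest).2
termination_by lines => lines.length
decreasing_by
  simp only [pvSplitAtCommit]
  have := List.length_dropWhile_le pvNotCommit rest
  simp only [List.length_cons]; omega

def to_rs_delimited_log_py_alt (log : String) : String :=
  if PySem.Str.strip log = "" then ""
  else
    let hr := pvSplitAtCommit (PySem.Str.splitlines log)
    let blocks := (if hr.1 = [] then [] else [PySem.Str.join "\n" hr.1]) ++ pvBodyBlocks hr.2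
    PySem.Str.join "\x1e" blocks ++ "\x1e"

-- ===== PRECONDITION & SPEC =====
def Spec_to_rs_delimited_log_py (log : String) (out : String) : Prop := out = to_rs_delimited_log_py_alt log
instance (log : String) (out : String) : Decidable (Spec_to_rs_delimited_log_py log out) := by unfold Spec_to_rs_delimited_log_py; infer_instance

-- ===== CLAIM (what is proved, stated in full; the proofs are below) =====
def Claim_equal_to_rs_delimited_log_py : Prop := ∀ (log : String), Dom_to_rs_delimited_log_py log → Spec_to_rs_delimited_log_py log (to_rs_delimited_log_py log)

-- ===== LEMMAS AND PROOFS =====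

-- accumulated blocks pass through A's loop untouched
lemma pvFoldA_blocks (lines : List String) :
    ∀ (blocks cur : List String),
      pvFinalizeA (lines.foldl pvStepA (blocks, cur)) =
        blocks ++ pvFinalizeA (lines.foldl pvStepA ([], cur)) := by
  induction lines with
  | nil => intro blocks cur; simp only [List.foldl_nil, pvFinalizeA]; split <;> simp
  | cons l ls ih =>
    intro blocks cur
    simp only [List.foldl_cons, pvStepA]
    by_cases h : PySem.Str.startswith l "GITAI_COMMIT " = true
    · simp only [h, if_pos]
      rw [ih, ih (if cur = [] then [] else [] ++ [PySem.Str.join "\n" cur])]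
      split <;> simp
    · simp only [h, Bool.false_eq_true, if_false]
      exact ih blocks (cur ++ [l])

-- A's loop from state ([], cur) computes the span decomposition of B
lemma pvFoldA_span (lines : List String) :
    ∀ (cur : List String),
      pvFinalizeA (lines.foldl pvStepA ([], cur)) =
        (if cur ++ lines.takeWhile pvNotCommit = [] then []
         else [PySem.Str.join "\n" (cur ++ lines.takeWhile pvNotCommit)]) ++
          pvBodyBlocks (lines.dropWhile pvNotCommit) := by
  induction lines with
  | nil => intro cur; simp [pvFinalizeA, pvBodyBlocks]
  | cons l ls ih =>
    intro cur
    by_cases h : PySem.Str.startswith l "GITAI_COMMIT " = true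
    · have hn : pvNotCommit l = false := by simp only [pvNotCommit, h, Bool.not_true]
      simp only [List.foldl_cons, pvStepA, h, if_pos, List.takeWhile_cons, hn,
        List.dropWhile_cons, Bool.false_eq_true, if_false, List.append_nil]
      rw [pvFoldA_blocks, ih]
      rw [pvBodyBlocks]
      simp only [pvSplitAtCommit, List.singleton_append]
      split <;> simp
    · have hn : pvNotCommit l = true := by simp only [pvNotCommit, Bool.not_eq_true', Bool.not_eq_true] at h ⊢; exact h
      simp only [List.foldl_cons, pvStepA, h, Bool.false_eq_true, if_false,
        List.takeWhile_cons, hn, List.dropWhile_cons, if_true]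
      rw [ih]
      have : cur ++ l :: ls.takeWhile pvNotCommit = (cur ++ [l]) ++ ls.takeWhile pvNotCommit := by
        simp
      rw [this]

-- ===== VERDICT (by name: the statement is the Claim_ definition above) =====
theorem to_rs_delimited_log_py_spec : Claim_equal_to_rs_delimited_log_py := by
  intro log _
  unfold Spec_to_rs_delimited_log_py to_rs_delimited_log_py to_rs_delimited_log_py_alt
  by_cases h : PySem.Str.strip log = ""
  · simp [h]
  · simp only [h, if_false, pvSplitAtCommit]
    rw [pvFoldA_span _ []]
    simp
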